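-- pv_equiv track=rewrite | github.com/ditchcord/auo-dues-compiler | main.py | getLineNameEnd
-- ===== SOURCE A (Python) =====
-- def getLineNameEnd(line: str, tokens: list):
--     lowestIndex = None
--     for token in tokens:
--         tokenIndex = line.lower().find(token)
--         if tokenIndex != -1 and (lowestIndex is None or (tokenIndex < lowestIndex)):
--             lowestIndex = tokenIndex
--     if lowestIndex is None:
--         return None
--     return lowestIndex-2
-- ===== SOURCE B (Python) =====
-- def getLineNameEnd(line: str, tokens: list):
--     # Position-major scan: walk the lowered line left to right and stop at the
--     # first position where any token starts; A instead computes each token's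
--     # first occurrence and takes the minimum.
--     low = line.lower()
--     for i in range(len(low) + 1):
--         if any(low.startswith(t, i) for t in tokens):
--             return i - 2
--     return None
-- ===== Notes on version B (the rewrite author's own statement) =====
-- stated objective: faster
-- what changed: B lowercases the line once and scans its positions left-to-right, returning at the first position where any token starts, instead of A's token-major pass that re-lowercases the line and runs a full find for every token and keeps the minimum.
import Mathlib
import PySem

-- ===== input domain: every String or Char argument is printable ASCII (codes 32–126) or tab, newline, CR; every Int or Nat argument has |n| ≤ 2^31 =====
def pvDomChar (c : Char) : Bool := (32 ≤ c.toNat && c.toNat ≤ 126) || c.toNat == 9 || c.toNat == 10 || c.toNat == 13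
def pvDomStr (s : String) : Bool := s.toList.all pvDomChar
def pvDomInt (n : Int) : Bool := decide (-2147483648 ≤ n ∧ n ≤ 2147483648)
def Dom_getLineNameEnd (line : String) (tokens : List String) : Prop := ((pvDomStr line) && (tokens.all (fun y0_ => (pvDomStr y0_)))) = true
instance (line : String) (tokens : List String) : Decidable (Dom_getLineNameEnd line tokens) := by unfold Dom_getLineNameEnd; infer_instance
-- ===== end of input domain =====

-- B lowercases the line once and scans positions left to right, returning at the first
-- position where any token starts; A re-lowercases the line per token, computes each
-- token's first occurrence in full, and takes the minimum (B measured faster).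

-- ===== PORT A =====
-- one loop step: `if tokenIndex != -1 and (lowestIndex is None or tokenIndex < lowestIndex)`
def pvStepA (line : String) (lowest : Option Int) (token : String) : Option Int :=
  let tokenIndex := PySem.Str.find (PySem.Str.lower line) token
  if tokenIndex = -1 then lowest
  else
    match lowest with
    | none => some tokenIndex
    | some l => if tokenIndex < l then some tokenIndex else lowest

def getLineNameEnd (line : String) (tokens : List String) : Option Int :=
  match tokens.foldl (pvStepA line) none with
  | none => none
  | some lowestIndex => some (lowestIndex - 2)

-- ===== PORT B =====
-- `for i in range(len(low)+1): if any(low.startswith(t, i) for t in tokens): return i-2`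
def pvScanB (toks : List (List Char)) (i : Nat) : List Char → Option Int
  | [] => if toks.any (fun t => t.isPrefixOf ([] : List Char)) then some ((i : Int) - 2) else none
  | c :: rest =>
    if toks.any (fun t => t.isPrefixOf (c :: rest)) then some ((i : Int) - 2)
    else pvScanB toks (i + 1) rest

def getLineNameEnd_alt (line : String) (tokens : List String) : Option Int :=
  pvScanB (tokens.map String.toList) 0 (PySem.Chars.lower line.toList)

-- ===== PRECONDITION & SPEC =====
def Spec_getLineNameEnd (line : String) (tokens : List String) (out : Option Int) : Prop := out = getLineNameEnd_alt line tokens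
instance (line : String) (tokens : List String) (out : Option Int) : Decidable (Spec_getLineNameEnd line tokens out) := by unfold Spec_getLineNameEnd; infer_instance

-- ===== CLAIM (what is proved, stated in full; the proofs are below) =====
def Claim_equal_getLineNameEnd : Prop := ∀ (line : String) (tokens : List String), Dom_getLineNameEnd line tokens → Spec_getLineNameEnd line tokens (getLineNameEnd line tokens)

-- ===== LEMMAS AND PROOFS =====

-- A's step with the lowered line precomputed as a char list (proof-side helper)
def pvStepC (low : List Char) (lowest : Option Int) (token : List Char) : Option Int :=
  let ti := PySem.Chars.find low token
  if ti = -1 then lowest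
  else
    match lowest with
    | none => some ti
    | some l => if ti < l then some ti else lowest

theorem pvFoldl_stepA (line : String) (ts : List String) : ∀ (acc : Option Int),
    ts.foldl (pvStepA line) acc
      = (ts.map String.toList).foldl (pvStepC (PySem.Chars.lower line.toList)) acc := by
  induction ts with
  | nil => intro acc; rfl
  | cons t ts ih =>
    intro acc
    simp only [List.foldl_cons, List.map_cons, ih]
    congr 1
    simp [pvStepA, pvStepC]

theorem pvFoldC_none (low : List Char) (ts : List (List Char)) : ∀ (acc : Option Int),
    ts.foldl (pvStepC low) acc = none ↔
      (acc = none ∧ ∀ t ∈ ts, PySem.Chars.find low t = -1) := by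
  induction ts with
  | nil => intro acc; simp
  | cons t ts ih =>
    intro acc
    simp only [List.foldl_cons, ih, List.forall_mem_cons]
    by_cases hf : PySem.Chars.find low t = -1
    · simp [pvStepC, hf]
    · cases acc with
      | none => simp [pvStepC, hf]
      | some l =>
        by_cases h2 : PySem.Chars.find low t < l <;> simp [pvStepC, hf, h2]

theorem pvFoldC_some (low : List Char) (ts : List (List Char)) : ∀ (acc : Option Int) (k : Int),
    ts.foldl (pvStepC low) acc = some k →
      (acc = some k ∨ ∃ t ∈ ts, PySem.Chars.find low t = k ∧ k ≠ -1) ∧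
      (∀ l, acc = some l → k ≤ l) ∧
      (∀ t ∈ ts, PySem.Chars.find low t ≠ -1 → k ≤ PySem.Chars.find low t) := by
  induction ts with
  | nil =>
    intro acc k h
    simp only [List.foldl_nil] at h
    refine ⟨Or.inl h, ?_, by simp⟩
    intro l hl
    rw [h] at hl
    injection hl with e
    omega
  | cons t ts ih =>
    intro acc k h
    simp only [List.foldl_cons] at h
    obtain ⟨hmem, hacc, hmin⟩ := ih (pvStepC low acc t) k h
    by_cases hf : PySem.Chars.find low t = -1
    · have hstep : pvStepC low acc t = acc := by simp [pvStepC, hf]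
      rw [hstep] at hmem hacc
      refine ⟨?_, hacc, ?_⟩
      · rcases hmem with h1 | ⟨u, hu, h2⟩
        · exact Or.inl h1
        · exact Or.inr ⟨u, List.mem_cons_of_mem _ hu, h2⟩
      · intro u hu hune
        rcases List.mem_cons.mp hu with rfl | hu'
        · exact absurd hf hune
        · exact hmin u hu' hune
    · cases acc with
      | none =>
        have hstep : pvStepC low none t = some (PySem.Chars.find low t) := by
          simp [pvStepC, hf]
        rw [hstep] at hmem hacc
        have hkf : k ≤ PySem.Chars.find low t := hacc _ rfl
        refine ⟨?_, by simp, ?_⟩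
        · rcases hmem with h1 | ⟨u, hu, h2⟩
          · have hk : PySem.Chars.find low t = k := by injection h1
            exact Or.inr ⟨t, by simp, hk, hk ▸ hf⟩
          · exact Or.inr ⟨u, List.mem_cons_of_mem _ hu, h2⟩
        · intro u hu hune
          rcases List.mem_cons.mp hu with rfl | hu'
          · exact hkf
          · exact hmin u hu' hune
      | some l =>
        by_cases h2 : PySem.Chars.find low t < l
        · have hstep : pvStepC low (some l) t = some (PySem.Chars.find low t) := by
            simp [pvStepC, hf, h2]
          rw [hstep] at hmem hacc
          have hkf : k ≤ PySem.Chars.find low t := hacc _ rfl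
          refine ⟨?_, ?_, ?_⟩
          · rcases hmem with h1 | ⟨u, hu, h3⟩
            · have hk : PySem.Chars.find low t = k := by injection h1
              exact Or.inr ⟨t, by simp, hk, hk ▸ hf⟩
            · exact Or.inr ⟨u, List.mem_cons_of_mem _ hu, h3⟩
          · intro l' hl'
            injection hl' with e
            omega
          · intro u hu hune
            rcases List.mem_cons.mp hu with rfl | hu'
            · exact hkf
            · exact hmin u hu' hune
        · have hstep : pvStepC low (some l) t = some l := by
            simp [pvStepC, hf, h2]
          rw [hstep] at hmem hacc
          have hkl : k ≤ l := hacc _ rfl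
          refine ⟨?_, ?_, ?_⟩
          · rcases hmem with h1 | ⟨u, hu, h3⟩
            · exact Or.inl h1
            · exact Or.inr ⟨u, List.mem_cons_of_mem _ hu, h3⟩
          · intro l' hl'
            injection hl' with e
            omega
          · intro u hu hune
            rcases List.mem_cons.mp hu with rfl | hu'
            · omega
            · exact hmin u hu' hune

theorem pvScan_none (toks : List (List Char)) (s : List Char) : ∀ (i : Nat),
    pvScanB toks i s = none ↔ ∀ t ∈ toks, ¬ t <:+: s := by
  induction s with
  | nil =>
    intro i
    by_cases h : toks.any (fun t => t.isPrefixOf ([] : List Char)) = true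
    · simp only [pvScanB, if_pos h]
      simp only [List.any_eq_true, List.isPrefixOf_iff_prefix, List.prefix_nil] at h
      obtain ⟨t, ht, rfl⟩ := h
      constructor
      · intro hc; exact absurd hc (by simp)
      · intro hall; exact absurd List.nil_infix (hall [] ht)
    · simp only [pvScanB, if_neg h]
      simp only [List.any_eq_true, List.isPrefixOf_iff_prefix, List.prefix_nil, not_exists] at h
      constructor
      · intro _ t ht hinf
        exact (h t) ⟨ht, List.eq_nil_of_infix_nil hinf⟩
      · intro _; trivial
  | cons c rest ih =>
    intro i
    by_cases h : toks.any (fun t => t.isPrefixOf (c :: rest)) = true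
    · simp only [pvScanB, if_pos h]
      simp only [List.any_eq_true, List.isPrefixOf_iff_prefix] at h
      obtain ⟨t, ht, hp⟩ := h
      constructor
      · intro hc; exact absurd hc (by simp)
      · intro hall; exact absurd hp.isInfix (hall t ht)
    · simp only [pvScanB, if_neg h, ih]
      simp only [List.any_eq_true, List.isPrefixOf_iff_prefix, not_exists] at h
      constructor
      · intro hall t ht hinf
        rcases List.infix_cons_iff.mp hinf with hp | hinf'
        · exact (h t) ⟨ht, hp⟩
        · exact hall t ht hinf'
      · intro hall t ht hinf'
        exact hall t ht (List.infix_cons_iff.mpr (Or.inr hinf'))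

theorem pvScan_some (toks : List (List Char)) (s : List Char) : ∀ (i m : Nat),
    (∃ t ∈ toks, t <+: s.drop m) → (∀ j < m, ¬ ∃ t ∈ toks, t <+: s.drop j) →
    pvScanB toks i s = some ((i : Int) + (m : Int) - 2) := by
  induction s with
  | nil =>
    intro i m hm hmin
    have hm0 : m = 0 := by
      by_contra h0
      exact hmin 0 (Nat.pos_of_ne_zero h0) (by simpa using hm)
    subst hm0
    have hany : toks.any (fun t => t.isPrefixOf ([] : List Char)) = true := by
      obtain ⟨t, ht, hp⟩ := hm
      exact List.any_eq_true.mpr ⟨t, ht, List.isPrefixOf_iff_prefix.mpr (by simpa using hp)⟩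
    simp only [pvScanB, if_pos hany]
    norm_num
  | cons c rest ih =>
    intro i m hm hmin
    cases m with
    | zero =>
      have hany : toks.any (fun t => t.isPrefixOf (c :: rest)) = true := by
        obtain ⟨t, ht, hp⟩ := hm
        exact List.any_eq_true.mpr ⟨t, ht, List.isPrefixOf_iff_prefix.mpr (by simpa using hp)⟩
      simp only [pvScanB, if_pos hany]
      norm_num
    | succ m' =>
      have h0 : ¬ ∃ t ∈ toks, t <+: (c :: rest) := by
        have := hmin 0 (Nat.succ_pos m')
        simpa using this
      have hany : ¬ toks.any (fun t => t.isPrefixOf (c :: rest)) = true := by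
        rw [List.any_eq_true]
        intro ⟨t, ht, hp⟩
        exact h0 ⟨t, ht, List.isPrefixOf_iff_prefix.mp hp⟩
      simp only [pvScanB, if_neg hany]
      have := ih (i + 1) m' (by simpa using hm)
        (fun j hj => by
          have := hmin (j + 1) (by omega)
          simpa using this)
      rw [this]
      congr 1
      push_cast
      ring

-- ===== VERDICT (by name: the statement is the Claim_ definition above) =====
theorem getLineNameEnd_spec : Claim_equal_getLineNameEnd := by
  intro line tokens _
  unfold Spec_getLineNameEnd getLineNameEnd getLineNameEnd_alt
  rw [pvFoldl_stepA]
  set low := PySem.Chars.lower line.toList with hlow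
  set toks := tokens.map String.toList with htoks
  by_cases h : ∃ t ∈ toks, t <:+: low
  · cases hF : toks.foldl (pvStepC low) none with
    | none =>
      exfalso
      obtain ⟨t0, ht0, hinf⟩ := h
      have := ((pvFoldC_none low toks none).mp hF).2 t0 ht0
      exact (PySem.Chars.find_ne_neg_one_iff low t0).mpr hinf this
    | some k =>
      obtain ⟨hmem, -, hmin⟩ := pvFoldC_some low toks none k hF
      obtain ⟨t1, ht1, hft1, hkne⟩ := hmem.resolve_left (by simp)
      have hk0 : 0 ≤ k := by
        have := PySem.Chars.neg_one_le_find low t1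
        omega
      have hf1 : 0 ≤ PySem.Chars.find low t1 := by rw [hft1]; exact hk0
      have hpre : t1 <+: low.drop k.toNat := by
        have := (PySem.Chars.find_spec hf1).1
        rwa [hft1] at this
      have hminB : ∀ j < k.toNat, ¬ ∃ t ∈ toks, t <+: low.drop j := by
        intro j hj ⟨t, ht, hp⟩
        have hisin : PySem.Chars.isIn t low = true :=
          (PySem.Chars.exists_prefix_drop_iff_isIn t low).mp ⟨j, hp⟩
        have hinf : t <:+: low := (PySem.Chars.isIn_iff_infix t low).mp hisin
        have hfne : PySem.Chars.find low t ≠ -1 :=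
          (PySem.Chars.find_ne_neg_one_iff low t).mpr hinf
        have hkle : k ≤ PySem.Chars.find low t := hmin t ht hfne
        have hjlt : j < (PySem.Chars.find low t).toNat := by omega
        exact (PySem.Chars.find_spec (by omega)).2 j hjlt hp
      rw [pvScan_some toks low 0 k.toNat ⟨t1, ht1, hpre⟩ hminB]
      show some (k - 2) = some ((0 : Int) + ((k.toNat : Nat) : Int) - 2)
      congr 1
      omega
  · have hA : toks.foldl (pvStepC low) none = none :=
      (pvFoldC_none low toks none).mpr
        ⟨rfl, fun t ht => (PySem.Chars.find_eq_neg_one_iff low t).mpr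
          (fun hinf => h ⟨t, ht, hinf⟩)⟩
    have hB : pvScanB toks 0 low = none :=
      (pvScan_none toks low 0).mpr (fun t ht hinf => h ⟨t, ht, hinf⟩)
    rw [hA, hB]
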